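-- pv_equiv track=rewrite | github.com/aaditey932/imu-game-gesture-recgonition | scripts/rename_take_ids.py | remap_take_ids
-- ===== SOURCE A (Python) =====
-- def iter_run_groups(rows: list[list[str]], header: list[str]):
--     """Split data rows into consecutive runs with same (label, timestamp_iso, take_id)."""
--     i_label = header.index("label")
--     i_ts = header.index("timestamp_iso")
--     i_take = header.index("take_id")
--
--     current: list[list[str]] | None = None
--     key: tuple[str, str, str] | None = None
--
--     for row in rows:
--         if not row:
--             continue
--         k = (row[i_label], row[i_ts], row[i_take])
--         if key is None or k != key:
--             if current is not None:
--                 yield current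
--             current = [row]
--             key = k
--         else:
--             current.append(row)
--     if current is not None:
--         yield current
--
-- def remap_take_ids(
--     rows: list[list[str]],
--     header: list[str],
--     chunk: int,
--     start_id: int,
-- ) -> tuple[list[list[str]], int, int]:
--     """
--     Returns (new_data_rows, next_id_after_file, n_runs_processed).
--     """
--     if "take_id" not in header or "timestamp_iso" not in header:
--         raise ValueError("CSV must include timestamp_iso and take_id columns.")
--
--     i_take = header.index("take_id")
--     data_rows = [r for r in rows if r]
--     groups = list(iter_run_groups(data_rows, header))
--
--     next_id = start_id
--     out: list[list[str]] = []
--     for group in groups: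
--         for i, row in enumerate(group):
--             row = list(row)
--             row[i_take] = str(next_id + (i // chunk))
--             out.append(row)
--         next_id += (len(group) + chunk - 1) // chunk
--
--     return out, next_id, len(groups)
-- ===== SOURCE B (Python) =====
-- def remap_take_ids(rows, header, chunk, start_id):
--     """Single streaming pass: fuse run detection and id assignment."""
--     if "take_id" not in header or "timestamp_iso" not in header:
--         raise ValueError("CSV must include timestamp_iso and take_id columns.")
--     i_label = header.index("label")
--     i_ts = header.index("timestamp_iso")
--     i_take = header.index("take_id")
--
--     out = []
--     next_id = start_id
--     n_runs = 0
--     prev_key = None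
--     pos = 0
--     for row in rows:
--         if not row:
--             continue
--         k = (row[i_label], row[i_ts], row[i_take])
--         if prev_key is None:
--             prev_key = k
--             pos = 0
--         elif k != prev_key:
--             next_id += (pos + 1 + chunk - 1) // chunk
--             n_runs += 1
--             prev_key = k
--             pos = 0
--         else:
--             pos += 1
--         new_row = list(row)
--         new_row[i_take] = str(next_id + pos // chunk)
--         out.append(new_row)
--     if prev_key is not None:
--         next_id += (pos + 1 + chunk - 1) // chunk
--         n_runs += 1
--     return out, next_id, n_runs
-- ===== Notes on version B (the rewrite author's own statement) =====
-- stated objective: alternative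
-- what changed: B fuses A's two-phase design (materialize the list of run groups via a generator, then a second nested pass assigning ids per group) into one streaming loop over the rows that tracks the previous run key, the within-run position, next_id and a run counter, closing runs on the fly.
import Mathlib
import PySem

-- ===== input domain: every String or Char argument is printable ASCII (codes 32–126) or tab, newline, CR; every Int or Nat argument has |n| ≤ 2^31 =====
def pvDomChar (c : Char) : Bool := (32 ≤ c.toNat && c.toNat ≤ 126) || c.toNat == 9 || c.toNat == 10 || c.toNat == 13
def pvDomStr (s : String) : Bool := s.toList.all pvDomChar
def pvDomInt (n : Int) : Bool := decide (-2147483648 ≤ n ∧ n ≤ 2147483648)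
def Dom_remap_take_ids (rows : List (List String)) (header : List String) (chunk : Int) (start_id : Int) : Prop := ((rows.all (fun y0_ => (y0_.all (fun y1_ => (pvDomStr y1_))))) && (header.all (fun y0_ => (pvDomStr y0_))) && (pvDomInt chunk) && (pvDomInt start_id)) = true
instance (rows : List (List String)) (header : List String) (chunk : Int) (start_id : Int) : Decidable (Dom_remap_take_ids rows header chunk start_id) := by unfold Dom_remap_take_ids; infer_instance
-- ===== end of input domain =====

-- B fuses A's two phases (build list of run groups, then assign ids) into one streaming pass
-- over the rows; equivalence is about the return value (neither implementation mutates its input).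

-- ===== PORT A =====
-- the run key (label, timestamp_iso, take_id) of a row
def pvKeyOf (iL iT iK : Nat) (row : List String) : String × String × String :=
  (row.getD iL "", row.getD iT "", row.getD iK "")

-- one step of the generator loop of iter_run_groups; state = (yielded groups, current, key)
-- (row indexing row[i] with an in-range nonnegative index ports as List.getD; out of range the
-- Python raises and the input is outside Pre_)
def pvGenStep (iL iT iK : Nat)
    (st : List (List (List String)) × Option (List (List String)) × Option (String × String × String))
    (row : List String) :
    List (List (List String)) × Option (List (List String)) × Option (String × String × String) :=
  if row = [] then st
  else
    let k := pvKeyOf iL iT iK row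
    if st.2.2 = none ∨ st.2.2 ≠ some k then
      (st.1 ++ (match st.2.1 with | none => [] | some c => [c]), some [row], some k)
    else
      (st.1, (st.2.1).map (fun c => c ++ [row]), st.2.2)

-- list(iter_run_groups(rows, header)); header.index(...) raises when absent → outside Pre_, .getD 0 junk
def pvIterRunGroups (rows : List (List String)) (header : List String) : List (List (List String)) :=
  let iL := (PySem.List.index? header "label").getD 0
  let iT := (PySem.List.index? header "timestamp_iso").getD 0
  let iK := (PySem.List.index? header "take_id").getD 0
  let fin := rows.foldl (pvGenStep iL iT iK) ([], none, none)
  match fin.2.1 with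
  | none => fin.1
  | some c => fin.1 ++ [c]

-- body of A's per-group loop: state = (next_id, out); row[i_take] = str(...) ports as List.set
def pvAStep (iK : Nat) (chunk : Int) (st : Int × List (List String)) (group : List (List String)) :
    Int × List (List String) :=
  let out2 := (PySem.List.enumerate group 0).foldl
    (fun o p => o ++ [p.2.set iK (PySem.Int.toStr (st.1 + PySem.Int.floordiv p.1 chunk))]) st.2
  (st.1 + PySem.Int.floordiv ((group.length : Int) + chunk - 1) chunk, out2)

def remap_take_ids (rows : List (List String)) (header : List String) (chunk : Int) (start_id : Int) :
    List (List String) × Int × Int :=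
  -- the ValueError guard and the index lookups raise on inputs outside Pre_
  let iK := (PySem.List.index? header "take_id").getD 0
  let data_rows := rows.filter (fun r => !r.isEmpty)
  let groups := pvIterRunGroups data_rows header
  let res := groups.foldl (pvAStep iK chunk) (start_id, [])
  (res.2, res.1, (groups.length : Int))

-- ===== PORT B =====
-- one step of B's single streaming loop; state = (out, next_id, n_runs, prev_key, pos)
def pvBStep (iL iT iK : Nat) (chunk : Int)
    (st : List (List String) × Int × Int × Option (String × String × String) × Int)
    (row : List String) :
    List (List String) × Int × Int × Option (String × String × String) × Int :=
  if row = [] then st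
  else
    let k := pvKeyOf iL iT iK row
    let upd : Int × Int × Option (String × String × String) × Int :=
      match st.2.2.2.1 with
      | none => (st.2.1, st.2.2.1, some k, 0)
      | some pk =>
        if k ≠ pk then
          (st.2.1 + PySem.Int.floordiv (st.2.2.2.2 + 1 + chunk - 1) chunk, st.2.2.1 + 1, some k, 0)
        else
          (st.2.1, st.2.2.1, some pk, st.2.2.2.2 + 1)
    (st.1 ++ [row.set iK (PySem.Int.toStr (upd.1 + PySem.Int.floordiv upd.2.2.2 chunk))],
     upd.1, upd.2.1, upd.2.2.1, upd.2.2.2)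

def remap_take_ids_alt (rows : List (List String)) (header : List String) (chunk : Int) (start_id : Int) :
    List (List String) × Int × Int :=
  let iL := (PySem.List.index? header "label").getD 0
  let iT := (PySem.List.index? header "timestamp_iso").getD 0
  let iK := (PySem.List.index? header "take_id").getD 0
  let fin := rows.foldl (pvBStep iL iT iK chunk) ([], start_id, 0, none, 0)
  match fin.2.2.2.1 with
  | none => (fin.1, fin.2.1, fin.2.2.1)
  | some _ =>
    (fin.1, fin.2.1 + PySem.Int.floordiv (fin.2.2.2.2 + 1 + chunk - 1) chunk, fin.2.2.1 + 1)

-- ===== PRECONDITION & SPEC =====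
-- Exactly the inputs on which the Python A returns: the three columns exist, every non-empty row
-- is long enough for the three column indices (else IndexError), and chunk ≠ 0 unless every row
-- is empty (else ZeroDivisionError).
def Pre_remap_take_ids (rows : List (List String)) (header : List String) (chunk : Int) (start_id : Int) : Prop :=
  "label" ∈ header ∧ "timestamp_iso" ∈ header ∧ "take_id" ∈ header ∧
  (chunk ≠ 0 ∨ ∀ r ∈ rows, r = []) ∧
  (∀ r ∈ rows, r ≠ [] →
    header.idxOf "label" < r.length ∧ header.idxOf "timestamp_iso" < r.length ∧
    header.idxOf "take_id" < r.length)
instance (rows : List (List String)) (header : List String) (chunk : Int) (start_id : Int) : Decidable (Pre_remap_take_ids rows header chunk start_id) := by unfold Pre_remap_take_ids; infer_instance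

def pvWitness_remap_take_ids : List (List String) × List String × Int × Int :=
  ([["a", "t1", "0"], ["a", "t1", "0"], ["a", "t1", "0"], ["b", "t2", "0"]],
   ["label", "timestamp_iso", "take_id"], 2, 5)

def Spec_remap_take_ids (rows : List (List String)) (header : List String) (chunk : Int) (start_id : Int) (out : List (List String) × Int × Int) : Prop := out = remap_take_ids_alt rows header chunk start_id
instance (rows : List (List String)) (header : List String) (chunk : Int) (start_id : Int) (out : List (List String) × Int × Int) : Decidable (Spec_remap_take_ids rows header chunk start_id out) := by unfold Spec_remap_take_ids; infer_instance

-- ===== CLAIM (what is proved, stated in full; the proofs are below) =====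
def Claim_equal_remap_take_ids : Prop := ∀ (rows : List (List String)) (header : List String) (chunk : Int) (start_id : Int), Dom_remap_take_ids rows header chunk start_id → Pre_remap_take_ids rows header chunk start_id → Spec_remap_take_ids rows header chunk start_id (remap_take_ids rows header chunk start_id)

-- ===== LEMMAS AND PROOFS =====

-- recursive form of A's generator, run from a mid-state
def pvRunGen (iL iT iK : Nat) (rs : List (List String))
    (cur : Option (List (List String))) (key : Option (String × String × String)) :
    List (List (List String)) :=
  match rs with
  | [] => match cur with | none => [] | some c => [c]
  | r :: rs =>
    if r = [] then pvRunGen iL iT iK rs cur key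
    else
      let k := pvKeyOf iL iT iK r
      if key = none ∨ key ≠ some k then
        (match cur with | none => [] | some c => [c]) ++ pvRunGen iL iT iK rs (some [r]) (some k)
      else
        pvRunGen iL iT iK rs (cur.map (fun c => c ++ [r])) key

-- the rows A emits for a group, as a map
def pvEmit (iK : Nat) (chunk : Int) (n : Int) (g : List (List String)) : List (List String) :=
  (PySem.List.enumerate g 0).map (fun p => p.2.set iK (PySem.Int.toStr (n + PySem.Int.floordiv p.1 chunk)))

-- closing the generator state yields the pending group
def pvFinishG (st : List (List (List String)) × Option (List (List String)) × Option (String × String × String)) :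
    List (List (List String)) :=
  match st.2.1 with | none => st.1 | some c => st.1 ++ [c]

-- closing B's loop state
def pvFinishB (chunk : Int)
    (st : List (List String) × Int × Int × Option (String × String × String) × Int) :
    List (List String) × Int × Int :=
  match st.2.2.2.1 with
  | none => (st.1, st.2.1, st.2.2.1)
  | some _ =>
    (st.1, st.2.1 + PySem.Int.floordiv (st.2.2.2.2 + 1 + chunk - 1) chunk, st.2.2.1 + 1)

theorem pvGenStep_skip (iL iT iK : Nat) (st) : pvGenStep iL iT iK st [] = st := by
  simp [pvGenStep]

theorem foldl_gen_filter (iL iT iK : Nat) (rs : List (List String)) (st) :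
    List.foldl (pvGenStep iL iT iK) st (rs.filter (fun r => !r.isEmpty)) =
      List.foldl (pvGenStep iL iT iK) st rs := by
  induction rs generalizing st with
  | nil => rfl
  | cons r rs ih =>
    by_cases hr : r = []
    · subst hr; simpa [pvGenStep_skip] using ih st
    · have : r.isEmpty = false := by simpa [List.isEmpty_iff] using hr
      simp [List.filter, this, ih]

theorem gen_fold_eq_runGen (iL iT iK : Nat) (rs : List (List String)) (gs cur key) :
    pvFinishG (List.foldl (pvGenStep iL iT iK) (gs, cur, key) rs) =
      gs ++ pvRunGen iL iT iK rs cur key := by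
  induction rs generalizing gs cur key with
  | nil => cases cur <;> simp [pvFinishG, pvRunGen]
  | cons r rs ih =>
    by_cases hr : r = []
    · subst hr; simp [pvGenStep_skip, pvRunGen, ih]
    · by_cases hk : key = none ∨ key ≠ some (pvKeyOf iL iT iK r)
      · simp only [pvRunGen, List.foldl_cons, pvGenStep, if_neg hr, if_pos hk, ih]
        cases cur <;> simp
      · simp only [pvRunGen, List.foldl_cons, pvGenStep, if_neg hr, if_neg hk, ih]

theorem pv_foldl_snoc {α β : Type} (f : α → β) (l : List α) (out : List β) :
    List.foldl (fun o x => o ++ [f x]) out l = out ++ l.map f := by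
  induction l generalizing out with
  | nil => simp
  | cons x l ih => simp [ih]

theorem pvAStep_eq (iK : Nat) (chunk n : Int) (out : List (List String)) (g : List (List String)) :
    pvAStep iK chunk (n, out) g =
      (n + PySem.Int.floordiv ((g.length : Int) + chunk - 1) chunk, out ++ pvEmit iK chunk n g) := by
  unfold pvAStep pvEmit
  rw [pv_foldl_snoc (fun p : Int × List String =>
    p.2.set iK (PySem.Int.toStr (n + PySem.Int.floordiv p.1 chunk)))]

theorem pvEmit_append_singleton (iK : Nat) (chunk n : Int) (g : List (List String)) (r : List String) :
    pvEmit iK chunk n (g ++ [r]) =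
      pvEmit iK chunk n g ++ [r.set iK (PySem.Int.toStr (n + PySem.Int.floordiv (g.length : Int) chunk))] := by
  simp [pvEmit, PySem.List.enumerate_append, PySem.List.enumerate_cons, PySem.List.enumerate_nil]

theorem pvEmit_singleton (iK : Nat) (chunk n : Int) (r : List String) :
    pvEmit iK chunk n [r] = [r.set iK (PySem.Int.toStr (n + PySem.Int.floordiv 0 chunk))] := by
  simp [pvEmit, PySem.List.enumerate_cons, PySem.List.enumerate_nil]

-- main invariant: B's loop run from a mid-run state equals A's per-group phase on the
-- remaining generator output
theorem pvMain (iL iT iK : Nat) (chunk : Int) (rs : List (List String)) :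
    ∀ (cur : List (List String)) (k : String × String × String)
      (out : List (List String)) (next_id nruns : Int),
    pvFinishB chunk (List.foldl (pvBStep iL iT iK chunk)
        (out ++ pvEmit iK chunk next_id cur, next_id, nruns, some k, (cur.length : Int) - 1) rs) =
      (let gs := pvRunGen iL iT iK rs (some cur) (some k)
       let res := gs.foldl (pvAStep iK chunk) (next_id, out)
       (res.2, res.1, nruns + (gs.length : Int))) := by
  induction rs with
  | nil =>
    intro cur k out next_id nruns
    have e1 : (cur.length : Int) - 1 + 1 + chunk - 1 = (cur.length : Int) + chunk - 1 := by ring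
    simp only [List.foldl_nil, pvFinishB, pvRunGen, List.foldl_cons, pvAStep_eq, e1]
    simp
  | cons r rs ih =>
    intro cur k out next_id nruns
    by_cases hr : r = []
    · subst hr
      simpa [pvRunGen, pvBStep] using ih cur k out next_id nruns
    · by_cases hk : pvKeyOf iL iT iK r = k
      · -- same key: the run grows
        have e0 : (cur.length : Int) - 1 + 1 = (cur.length : Int) := by ring
        have hB : pvBStep iL iT iK chunk
            (out ++ pvEmit iK chunk next_id cur, next_id, nruns, some k, (cur.length : Int) - 1) r =
            (out ++ pvEmit iK chunk next_id (cur ++ [r]), next_id, nruns, some k,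
              ((cur ++ [r]).length : Int) - 1) := by
          simp [pvBStep, if_neg hr, hk, e0, pvEmit_append_singleton, List.append_assoc]
        have hG : pvRunGen iL iT iK (r :: rs) (some cur) (some k) =
            pvRunGen iL iT iK rs (some (cur ++ [r])) (some k) := by
          simp [pvRunGen, if_neg hr, hk]
        rw [List.foldl_cons, hB, hG]
        exact ih (cur ++ [r]) k out next_id nruns
      · -- new key: close the run, open a new one
        have hB : pvBStep iL iT iK chunk
            (out ++ pvEmit iK chunk next_id cur, next_id, nruns, some k, (cur.length : Int) - 1) r =
            ((out ++ pvEmit iK chunk next_id cur) ++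
                pvEmit iK chunk (next_id + PySem.Int.floordiv ((cur.length : Int) + chunk - 1) chunk) [r],
              next_id + PySem.Int.floordiv ((cur.length : Int) + chunk - 1) chunk, nruns + 1,
              some (pvKeyOf iL iT iK r), ((([r] : List (List String)).length : Int) - 1)) := by
          have e1 : (cur.length : Int) - 1 + 1 + chunk - 1 = (cur.length : Int) + chunk - 1 := by ring
          simp only [pvBStep, if_neg hr, ne_eq, hk, e1]
          simp [pvEmit_singleton]
        have hG : pvRunGen iL iT iK (r :: rs) (some cur) (some k) =
            cur :: pvRunGen iL iT iK rs (some [r]) (some (pvKeyOf iL iT iK r)) := by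
          simp [pvRunGen, if_neg hr, Ne.symm hk]
        rw [List.foldl_cons, hB, hG,
          ih [r] (pvKeyOf iL iT iK r) (out ++ pvEmit iK chunk next_id cur)
            (next_id + PySem.Int.floordiv ((cur.length : Int) + chunk - 1) chunk) (nruns + 1)]
        simp only [List.foldl_cons, pvAStep_eq]
        simp
        omega

-- B's loop from the initial state equals A's phase-2 over the full generator output
theorem pvTop (iL iT iK : Nat) (chunk : Int) (rs : List (List String)) :
    ∀ (out : List (List String)) (next_id nruns : Int),
    pvFinishB chunk (List.foldl (pvBStep iL iT iK chunk) (out, next_id, nruns, none, 0) rs) =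
      (let gs := pvRunGen iL iT iK rs none none
       let res := gs.foldl (pvAStep iK chunk) (next_id, out)
       (res.2, res.1, nruns + (gs.length : Int))) := by
  induction rs with
  | nil => intro out next_id nruns; simp [pvFinishB, pvRunGen]
  | cons r rs ih =>
    intro out next_id nruns
    by_cases hr : r = []
    · subst hr; simpa [pvRunGen, pvBStep] using ih out next_id nruns
    · have hB : pvBStep iL iT iK chunk (out, next_id, nruns, none, 0) r =
          (out ++ pvEmit iK chunk next_id [r], next_id, nruns,
            some (pvKeyOf iL iT iK r), ((([r] : List (List String)).length : Int) - 1)) := by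
        simp only [pvBStep, if_neg hr]
        simp [pvEmit_singleton]
      have hG : pvRunGen iL iT iK (r :: rs) none none =
          pvRunGen iL iT iK rs (some [r]) (some (pvKeyOf iL iT iK r)) := by
        simp [pvRunGen, if_neg hr]
      rw [List.foldl_cons, hB, hG,
        pvMain iL iT iK chunk rs [r] (pvKeyOf iL iT iK r) out next_id nruns]

theorem pv_equal_core (iL iT iK : Nat) (chunk start_id : Int) (rows : List (List String)) :
    (let gs := pvFinishG (List.foldl (pvGenStep iL iT iK) ([], none, none)
        (rows.filter (fun r => !r.isEmpty)))
     let res := gs.foldl (pvAStep iK chunk) (start_id, ([] : List (List String)))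
     (res.2, res.1, (gs.length : Int)))
    = pvFinishB chunk (rows.foldl (pvBStep iL iT iK chunk) ([], start_id, 0, none, 0)) := by
  rw [foldl_gen_filter, gen_fold_eq_runGen, pvTop]
  simp

theorem pv_equal (rows : List (List String)) (header : List String) (chunk start_id : Int) :
    remap_take_ids rows header chunk start_id = remap_take_ids_alt rows header chunk start_id :=
  pv_equal_core ((PySem.List.index? header "label").getD 0)
    ((PySem.List.index? header "timestamp_iso").getD 0)
    ((PySem.List.index? header "take_id").getD 0) chunk start_id rows

-- ===== VERDICT (by name: the statement is the Claim_ definition above) =====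
theorem remap_take_ids_spec : Claim_equal_remap_take_ids := by
  intro rows header chunk start_id _ _
  exact (pv_equal rows header chunk start_id).symm ▸ rfl
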